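-- pv_equiv track=rewrite | github.com/amaroqq/Py_Exercices | M6.py | remodd
-- ===== SOURCE A (Python) =====
-- def remodd(ls:list):
--     y=len(ls)
--     i = 0
--     while(i<y):
--         if (ls[i]%2==1):
--             y-=1
--             ls.pop(i)
--             i-=1
--         i+=1
--     return ls
-- ===== SOURCE B (Python) =====
-- def remodd(ls: list):
--     # one O(n) pass: keep the evens (x % 2 != 1), splice back in place (same object)
--     ls[:] = [x for x in ls if x % 2 != 1]
--     return ls
-- ===== Notes on version B (the rewrite author's own statement) =====
-- stated objective: faster
-- what changed: Replaces the index-backtracking while loop with repeated ls.pop(i) (each pop shifts the tail) by a single filtering pass whose result is spliced back into the same list object.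
import Mathlib
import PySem

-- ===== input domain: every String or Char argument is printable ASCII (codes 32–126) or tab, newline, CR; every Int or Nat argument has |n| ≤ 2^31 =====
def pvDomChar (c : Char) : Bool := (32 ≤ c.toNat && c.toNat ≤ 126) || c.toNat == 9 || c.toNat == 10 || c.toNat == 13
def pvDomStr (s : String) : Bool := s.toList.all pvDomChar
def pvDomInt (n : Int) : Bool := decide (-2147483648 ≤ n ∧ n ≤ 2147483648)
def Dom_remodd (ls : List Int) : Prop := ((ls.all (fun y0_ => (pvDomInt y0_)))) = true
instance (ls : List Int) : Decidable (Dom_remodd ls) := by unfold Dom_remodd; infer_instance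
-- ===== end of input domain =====

-- B replaces A's quadratic pop-with-backtrack loop by a single filtering pass spliced back in
-- place; both mutate the argument list in place (same object) and return it — the equivalence
-- proved here is about the returned value.


-- ===== PORT A =====
-- while(i<y): if ls[i]%2==1 then y-=1; ls.pop(i); i-=1; i+=1
def remoddLoop (ls : List Int) (i y : Int) : List Int :=
  if _h : i < y then
    match PySem.List.pyGet? ls i with
    | none => ls          -- unreachable: i is always a valid index while i < y = len ls
    | some v =>
      if PySem.Int.mod v 2 = 1 then
        match PySem.List.pop? ls i with
        | none => ls      -- unreachable
        | some (_, ls') => remoddLoop ls' ((i - 1) + 1) (y - 1)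
      else
        remoddLoop ls (i + 1) y
  else ls
termination_by (y - i).toNat
decreasing_by all_goals omega

def remodd (ls : List Int) : List Int := remoddLoop ls 0 (ls.length : Int)

-- ===== PORT B =====
-- ls[:] = [x for x in ls if x % 2 != 1]; return ls
def remodd_alt (ls : List Int) : List Int :=
  ls.filter (fun x => decide (PySem.Int.mod x 2 ≠ 1))

-- ===== PRECONDITION & SPEC =====
def Spec_remodd (ls : List Int) (out : List Int) : Prop := out = remodd_alt ls
instance (ls : List Int) (out : List Int) : Decidable (Spec_remodd ls out) := by unfold Spec_remodd; infer_instance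

-- ===== CLAIM (what is proved, stated in full; the proofs are below) =====
def Claim_equal_remodd : Prop := ∀ (ls : List Int), Dom_remodd ls → Spec_remodd ls (remodd ls)

-- ===== LEMMAS AND PROOFS =====

-- Loop invariant: with i = n and y = len ls, the loop keeps the already-compacted prefix
-- take n and filters the rest.
theorem remoddLoop_eq (k : Nat) :
    ∀ (n : Nat) (ls : List Int), ls.length - n ≤ k →
      remoddLoop ls (n : Int) (ls.length : Int) =
        ls.take n ++ (ls.drop n).filter (fun x => decide (PySem.Int.mod x 2 ≠ 1)) := by
  induction k with
  | zero =>
    intro n ls h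
    rw [remoddLoop]
    have hn : ls.length ≤ n := by omega
    simp [List.take_of_length_le hn, List.drop_of_length_le hn,
      show ¬ ((n : Int) < (ls.length : Int)) by exact_mod_cast not_lt.mpr hn]
  | succ k ih =>
    intro n ls h
    by_cases hn : n < ls.length
    · rw [remoddLoop]
      have hlt : (n : Int) < (ls.length : Int) := by exact_mod_cast hn
      rw [dif_pos hlt, PySem.List.pyGet?_natCast, List.getElem?_eq_getElem hn]
      dsimp only
      by_cases hodd : PySem.Int.mod ls[n] 2 = 1
      · rw [if_pos hodd, PySem.List.pop?_natCast ls n hn]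
        dsimp only
        have hlen : (ls.eraseIdx n).length = ls.length - 1 :=
          List.length_eraseIdx_of_lt hn
        have hcast : ((n : Int) - 1) + 1 = ((n : Int)) := by ring
        have hcast2 : ((ls.length : Int)) - 1 = ((ls.eraseIdx n).length : Int) := by
          rw [hlen]; omega
        rw [hcast, hcast2, ih n (ls.eraseIdx n) (by omega)]
        have herase : ls.eraseIdx n = ls.take n ++ ls.drop (n + 1) :=
          List.eraseIdx_eq_take_drop_succ ls n
        have htklen : (ls.take n).length = n := List.length_take_of_le (le_of_lt hn)
        have hq : decide (PySem.Int.mod ls[n] 2 ≠ 1) = false :=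
          decide_eq_false (fun hc => hc hodd)
        have hdropfilter : (ls.drop n).filter (fun x => decide (PySem.Int.mod x 2 ≠ 1)) =
            (ls.drop (n + 1)).filter (fun x => decide (PySem.Int.mod x 2 ≠ 1)) := by
          rw [List.drop_eq_getElem_cons hn, List.filter_cons, hq]
          simp only [Bool.false_eq_true, if_false]
        have h1 : (ls.take n ++ ls.drop (n + 1)).take n = ls.take n := by
          rw [List.take_append_of_le_length (le_of_eq htklen.symm), List.take_take,
            min_self]
        have h2 : (ls.take n ++ ls.drop (n + 1)).drop n = ls.drop (n + 1) := by
          rw [List.drop_append]; simp [htklen]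
        rw [herase, h1, h2, hdropfilter]
      · rw [if_neg hodd]
        have hc1 : ((n : Int) + 1) = ((n + 1 : Nat) : Int) := by push_cast; ring
        have hp : decide (PySem.Int.mod ls[n] 2 ≠ 1) = true := decide_eq_true hodd
        rw [hc1, ih (n + 1) ls (by omega), List.drop_eq_getElem_cons hn,
          List.filter_cons, hp, if_pos rfl]
        rw [List.take_add_one, List.getElem?_eq_getElem hn, Option.toList_some,
          List.append_assoc, List.singleton_append]
    · rw [remoddLoop]
      have hge : ls.length ≤ n := by omega
      simp [List.take_of_length_le hge, List.drop_of_length_le hge,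
        show ¬ ((n : Int) < (ls.length : Int)) by exact_mod_cast not_lt.mpr hge]

-- ===== VERDICT (by name: the statement is the Claim_ definition above) =====
theorem remodd_spec : Claim_equal_remodd := by
  intro ls _
  unfold Spec_remodd remodd remodd_alt
  have h := remoddLoop_eq ls.length 0 ls (by omega)
  simpa using h
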